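-- pv_equiv track=rewrite | github.com/paulsanett/mpg-forecasting-dashboard | web_forecast_app.py | categorize_event
-- ===== SOURCE A (Python) =====
-- def categorize_event(event_name):
--     """Categorize events based on name"""
--     event_lower = event_name.lower()
--
--     if 'lollapalooza' in event_lower:
--         return 'mega_festival'
--     elif any(sport in event_lower for sport in ['bears', 'bulls', 'blackhawks', 'cubs', 'sox', 'fire']):
--         return 'sports'
--     elif any(term in event_lower for term in ['festival', 'fest']):
--         return 'festival'
--     elif any(term in event_lower for term in ['broadway', 'symphony', 'opera', 'ballet']):
--         return 'major_performance'
--     elif any(term in event_lower for term in ['concert', 'music', 'performance', 'show']):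
--         return 'performance'
--     elif any(term in event_lower for term in ['holiday', 'christmas', 'thanksgiving', 'july 4']):
--         return 'holiday'
--     else:
--         return 'other'
-- ===== SOURCE B (Python) =====
-- # Position-scan re-implementation: instead of searching the string once per rule
-- # (first-match cascade), scan every start position of the lowercased name once,
-- # note the best (lowest) priority rank of any keyword beginning there, and map
-- # the final minimum rank to its category.
--
-- KEYWORDS = [
--     ("lollapalooza", 0),
--     ("bears", 1), ("bulls", 1), ("blackhawks", 1), ("cubs", 1), ("sox", 1), ("fire", 1),
--     ("festival", 2), ("fest", 2),
--     ("broadway", 3), ("symphony", 3), ("opera", 3), ("ballet", 3),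
--     ("concert", 4), ("music", 4), ("performance", 4), ("show", 4),
--     ("holiday", 5), ("christmas", 5), ("thanksgiving", 5), ("july 4", 5),
-- ]
--
-- CATS = ["mega_festival", "sports", "festival", "major_performance",
--         "performance", "holiday", "other"]
--
-- def categorize_event(event_name):
--     """Categorize events based on name"""
--     s = event_name.lower()
--     best = 6
--     for i in range(len(s)):
--         for kw, rank in KEYWORDS:
--             if s.startswith(kw, i):
--                 best = min(best, rank)
--     return CATS[best]
-- ===== Notes on version B (the rewrite author's own statement) =====
-- stated objective: alternative
-- what changed: Replaced the first-match if/elif substring cascade by a single scan over every start position of the lowercased name that accumulates the minimum priority rank of any keyword beginning there, then maps that rank to its category.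
import Mathlib
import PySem

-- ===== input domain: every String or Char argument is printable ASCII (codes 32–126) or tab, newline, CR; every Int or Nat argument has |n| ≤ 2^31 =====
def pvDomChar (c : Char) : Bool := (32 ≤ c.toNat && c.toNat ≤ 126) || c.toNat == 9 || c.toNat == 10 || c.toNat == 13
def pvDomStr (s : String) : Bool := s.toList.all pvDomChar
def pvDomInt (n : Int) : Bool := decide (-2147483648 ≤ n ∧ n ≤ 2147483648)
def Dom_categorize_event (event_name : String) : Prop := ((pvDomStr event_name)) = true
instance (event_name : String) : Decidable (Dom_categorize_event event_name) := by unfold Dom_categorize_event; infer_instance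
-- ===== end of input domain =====

-- B replaces A's first-match if/elif substring cascade by a single scan over every start
-- position of the lowercased name that accumulates the minimum priority rank of any
-- keyword beginning there, then maps that rank to its category (objective: alternative).

-- ===== PORT A =====
def categorize_event (event_name : String) : String :=
  let event_lower := PySem.Str.lower event_name
  if PySem.Str.isIn "lollapalooza" event_lower then "mega_festival"
  else if (["bears", "bulls", "blackhawks", "cubs", "sox", "fire"].any
      (fun sport => PySem.Str.isIn sport event_lower)) then "sports"
  else if (["festival", "fest"].any (fun term => PySem.Str.isIn term event_lower)) then "festival"
  else if (["broadway", "symphony", "opera", "ballet"].any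
      (fun term => PySem.Str.isIn term event_lower)) then "major_performance"
  else if (["concert", "music", "performance", "show"].any
      (fun term => PySem.Str.isIn term event_lower)) then "performance"
  else if (["holiday", "christmas", "thanksgiving", "july 4"].any
      (fun term => PySem.Str.isIn term event_lower)) then "holiday"
  else "other"

-- ===== PORT B =====
def pvKEYWORDS : List (String × Nat) :=
  [ ("lollapalooza", 0),
    ("bears", 1), ("bulls", 1), ("blackhawks", 1), ("cubs", 1), ("sox", 1), ("fire", 1),
    ("festival", 2), ("fest", 2),
    ("broadway", 3), ("symphony", 3), ("opera", 3), ("ballet", 3),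
    ("concert", 4), ("music", 4), ("performance", 4), ("show", 4),
    ("holiday", 5), ("christmas", 5), ("thanksgiving", 5), ("july 4", 5) ]

def pvCATS : List String :=
  ["mega_festival", "sports", "festival", "major_performance",
   "performance", "holiday", "other"]

def categorize_event_alt (event_name : String) : String :=
  let s := PySem.Str.lower event_name
  let best := (PySem.List.pyRange 0 (PySem.Str.len s) 1).foldl
    (fun best i =>
      pvKEYWORDS.foldl
        (fun b p =>
          -- Python s.startswith(kw, i) with 0 ≤ i ≤ len(s): prefix match at offset i (exact here)
          if PySem.Chars.startswith (s.toList.drop i.toNat) p.1.toList then min b p.2 else b)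
        best)
    6
  pvCATS.getD best "other"

-- ===== PRECONDITION & SPEC =====
def Spec_categorize_event (event_name : String) (out : String) : Prop := out = categorize_event_alt event_name
instance (event_name : String) (out : String) : Decidable (Spec_categorize_event event_name out) := by unfold Spec_categorize_event; infer_instance

-- ===== CLAIM =====
def Claim_equal_categorize_event : Prop := ∀ (event_name : String), Dom_categorize_event event_name → Spec_categorize_event event_name (categorize_event event_name)

-- ===== LEMMAS AND PROOFS =====

-- the inner per-position fold over the keyword table
def pvInner (t : List Char) (b : Nat) : Nat :=
  pvKEYWORDS.foldl
    (fun b p => if PySem.Chars.startswith t p.1.toList then min b p.2 else b) b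

def pvBest (L : List Char) : Nat :=
  (PySem.List.pyRange 0 (L.length : Int) 1).foldl
    (fun best i => pvInner (L.drop i.toNat) best) 6

lemma alt_eq_best (event_name : String) :
    categorize_event_alt event_name =
      pvCATS.getD (pvBest (PySem.Str.lower event_name).toList) "other" := by
  simp [categorize_event_alt, pvBest, pvInner, PySem.Str.len_eq]

-- inner fold: generic facts (over any keyword list)
lemma innerGen_le_init (t : List Char) (l : List (String × Nat)) (b : Nat) :
    l.foldl (fun b p => if PySem.Chars.startswith t p.1.toList then min b p.2 else b) b ≤ b := by
  induction l generalizing b with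
  | nil => simp
  | cons p rest ih =>
      simp only [List.foldl_cons]
      split
      · exact le_trans (ih _) (Nat.min_le_left _ _)
      · exact ih b

lemma innerGen_le_of_mem (t : List Char) (l : List (String × Nat)) (b : Nat)
    (p : String × Nat) (hp : p ∈ l) (hs : PySem.Chars.startswith t p.1.toList = true) :
    l.foldl (fun b p => if PySem.Chars.startswith t p.1.toList then min b p.2 else b) b ≤ p.2 := by
  induction l generalizing b with
  | nil => cases hp
  | cons q rest ih =>
      simp only [List.foldl_cons]
      rcases List.mem_cons.mp hp with h | h
      · subst h
        rw [hs]; simp only [if_true]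
        exact le_trans (innerGen_le_init t rest _) (Nat.min_le_right _ _)
      · split
        · exact ih _ h
        · exact ih b h

lemma innerGen_cases (t : List Char) (l : List (String × Nat)) (b : Nat) :
    l.foldl (fun b p => if PySem.Chars.startswith t p.1.toList then min b p.2 else b) b = b ∨
      ∃ p ∈ l, PySem.Chars.startswith t p.1.toList = true ∧
        l.foldl (fun b p => if PySem.Chars.startswith t p.1.toList then min b p.2 else b) b = p.2 := by
  induction l generalizing b with
  | nil => left; rfl
  | cons q rest ih =>
      simp only [List.foldl_cons]
      by_cases hq : PySem.Chars.startswith t q.1.toList = true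
      · rw [hq]; simp only [if_true]
        rcases ih (min b q.2) with h | ⟨p, hp, hs, he⟩
        · by_cases hbq : b ≤ q.2
          · left; rw [h, Nat.min_eq_left hbq]
          · right
            exact ⟨q, List.mem_cons_self, hq, by rw [h, Nat.min_eq_right (le_of_not_ge hbq)]⟩
        · right; exact ⟨p, List.mem_cons_of_mem _ hp, hs, he⟩
      · simp only [hq, if_false]
        rcases ih b with h | ⟨p, hp, hs, he⟩
        · left; exact h
        · right; exact ⟨p, List.mem_cons_of_mem _ hp, hs, he⟩

-- outer fold: only decreases
lemma outer_le_init (L : List Char) (is : List Int) (b : Nat) :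
    is.foldl (fun best i => pvInner (L.drop i.toNat) best) b ≤ b := by
  induction is generalizing b with
  | nil => simp
  | cons i rest ih =>
      simp only [List.foldl_cons]
      exact le_trans (ih _) (innerGen_le_init _ _ _)

lemma best_le_six (L : List Char) : pvBest L ≤ 6 := outer_le_init L _ 6

-- if a keyword of rank r occurs somewhere in L, the final best is ≤ r
lemma best_le_of_infix (L : List Char) (p : String × Nat) (hp : p ∈ pvKEYWORDS)
    (h : PySem.Chars.isIn p.1.toList L = true) : pvBest L ≤ p.2 := by
  have ⟨j, hj⟩ : ∃ j, p.1.toList <+: L.drop j :=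
    (PySem.Chars.exists_prefix_drop_iff_isIn _ _).mpr h
  have hne : p.1.toList ≠ [] := by
    fin_cases hp <;> simp
  have hjlt : j < L.length := by
    by_contra hge
    rw [List.drop_eq_nil_of_le (le_of_not_gt hge)] at hj
    exact hne (List.prefix_nil.mp hj)
  -- position (j : Int) is in pyRange 0 |L| 1
  have hmem : (j : Int) ∈ PySem.List.pyRange 0 (L.length : Int) 1 := by
    rw [PySem.List.mem_pyRange_one] <;> omega
  obtain ⟨pre, post, hsplit⟩ := List.mem_iff_append.mp hmem
  have hs : PySem.Chars.startswith (L.drop (j : Int).toNat) p.1.toList = true := by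
    rw [PySem.Chars.startswith_iff]; simpa using hj
  unfold pvBest
  rw [hsplit, List.foldl_append, List.foldl_cons]
  exact le_trans (outer_le_init L post _)
    (innerGen_le_of_mem _ _ _ p hp hs)

-- conversely, the final best is 6 or the rank of a keyword that occurs in L
lemma best_cases (L : List Char) :
    pvBest L = 6 ∨ ∃ p ∈ pvKEYWORDS, PySem.Chars.isIn p.1.toList L = true ∧ pvBest L = p.2 := by
  unfold pvBest
  generalize hb : (6 : Nat) = b
  clear hb
  have hgen : ∀ (is : List Int) (b : Nat),
      (∀ i ∈ is, 0 ≤ i ∧ i < (L.length : Int)) →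
      is.foldl (fun best i => pvInner (L.drop i.toNat) best) b = b ∨
        ∃ p ∈ pvKEYWORDS, PySem.Chars.isIn p.1.toList L = true ∧
          is.foldl (fun best i => pvInner (L.drop i.toNat) best) b = p.2 := by
    intro is
    induction is with
    | nil => intro b _; left; rfl
    | cons i rest ih =>
        intro b hbound
        simp only [List.foldl_cons]
        rcases ih (pvInner (L.drop i.toNat) b)
            (fun x hx => hbound x (List.mem_cons_of_mem _ hx)) with h | hex
        · rw [h]
          rcases innerGen_cases (L.drop i.toNat) pvKEYWORDS b with h2 | ⟨p, hp, hs, he⟩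
          · left; exact h2
          · right
            refine ⟨p, hp, ?_, he⟩
            apply (PySem.Chars.exists_prefix_drop_iff_isIn _ _).mp
            exact ⟨i.toNat, (PySem.Chars.startswith_iff _ _).mp hs⟩
        · right; exact hex
  exact hgen _ b (fun i hi => (PySem.List.mem_pyRange_one.mp hi))

-- A's six branch conditions, on the list side, and the index of the first true one
def pvCond (L : List Char) : Nat → Bool
  | 0 => PySem.Chars.isIn "lollapalooza".toList L
  | 1 => PySem.Chars.isIn "bears".toList L || (PySem.Chars.isIn "bulls".toList L ||
         (PySem.Chars.isIn "blackhawks".toList L || (PySem.Chars.isIn "cubs".toList L ||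
         (PySem.Chars.isIn "sox".toList L || PySem.Chars.isIn "fire".toList L))))
  | 2 => PySem.Chars.isIn "festival".toList L || PySem.Chars.isIn "fest".toList L
  | 3 => PySem.Chars.isIn "broadway".toList L || (PySem.Chars.isIn "symphony".toList L ||
         (PySem.Chars.isIn "opera".toList L || PySem.Chars.isIn "ballet".toList L))
  | 4 => PySem.Chars.isIn "concert".toList L || (PySem.Chars.isIn "music".toList L ||
         (PySem.Chars.isIn "performance".toList L || PySem.Chars.isIn "show".toList L))
  | 5 => PySem.Chars.isIn "holiday".toList L || (PySem.Chars.isIn "christmas".toList L ||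
         (PySem.Chars.isIn "thanksgiving".toList L || PySem.Chars.isIn "july 4".toList L))
  | _ => false

def pvRank (L : List Char) : Nat :=
  if pvCond L 0 then 0 else if pvCond L 1 then 1 else if pvCond L 2 then 2
  else if pvCond L 3 then 3 else if pvCond L 4 then 4 else if pvCond L 5 then 5 else 6

lemma a_eq_rank (event_name : String) :
    categorize_event event_name =
      pvCATS.getD (pvRank (PySem.Str.lower event_name).toList) "other" := by
  unfold categorize_event pvRank pvCond
  simp only [List.any_cons, List.any_nil, Bool.or_false, PySem.Str.isIn_eq]
  split_ifs <;> decide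

lemma rank_le_six (L : List Char) : pvRank L ≤ 6 := by
  unfold pvRank; split_ifs <;> omega

lemma cond_true_of_rank (L : List Char) (r : Nat) (hr : pvRank L = r) (h6 : r ≠ 6) :
    pvCond L r = true := by
  unfold pvRank at hr
  split_ifs at hr with h0 h1 h2 h3 h4 h5
  · subst hr; exact h0
  · subst hr; exact h1
  · subst hr; exact h2
  · subst hr; exact h3
  · subst hr; exact h4
  · subst hr; exact h5
  · exact absurd hr.symm h6

lemma rank_le_of_cond (L : List Char) (r : Nat) (h : pvCond L r = true) :
    pvRank L ≤ r := by
  by_cases h5 : r ≤ 5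
  · interval_cases r <;> unfold pvRank <;> split_ifs <;> first | omega | simp_all
  · exact le_trans (rank_le_six L) (by omega)

-- pvCond agrees with the keyword table: one direction per keyword, one per rank
lemma cond_of_kw (L : List Char) (p : String × Nat) (hp : p ∈ pvKEYWORDS)
    (h : PySem.Chars.isIn p.1.toList L = true) : pvCond L p.2 = true := by
  fin_cases hp <;> (simp at h; simp [pvCond, h])

lemma kw_of_cond (L : List Char) (r : Nat) (h : pvCond L r = true) :
    ∃ p ∈ pvKEYWORDS, p.2 = r ∧ PySem.Chars.isIn p.1.toList L = true := by
  match r with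
  | 0 => exact ⟨("lollapalooza", 0), by simp [pvKEYWORDS], rfl, h⟩
  | 1 =>
      simp only [pvCond, Bool.or_eq_true] at h
      rcases h with h | h | h | h | h | h
      · exact ⟨("bears", 1), by simp [pvKEYWORDS], rfl, h⟩
      · exact ⟨("bulls", 1), by simp [pvKEYWORDS], rfl, h⟩
      · exact ⟨("blackhawks", 1), by simp [pvKEYWORDS], rfl, h⟩
      · exact ⟨("cubs", 1), by simp [pvKEYWORDS], rfl, h⟩
      · exact ⟨("sox", 1), by simp [pvKEYWORDS], rfl, h⟩
      · exact ⟨("fire", 1), by simp [pvKEYWORDS], rfl, h⟩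
  | 2 =>
      simp only [pvCond, Bool.or_eq_true] at h
      rcases h with h | h
      · exact ⟨("festival", 2), by simp [pvKEYWORDS], rfl, h⟩
      · exact ⟨("fest", 2), by simp [pvKEYWORDS], rfl, h⟩
  | 3 =>
      simp only [pvCond, Bool.or_eq_true] at h
      rcases h with h | h | h | h
      · exact ⟨("broadway", 3), by simp [pvKEYWORDS], rfl, h⟩
      · exact ⟨("symphony", 3), by simp [pvKEYWORDS], rfl, h⟩
      · exact ⟨("opera", 3), by simp [pvKEYWORDS], rfl, h⟩
      · exact ⟨("ballet", 3), by simp [pvKEYWORDS], rfl, h⟩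
  | 4 =>
      simp only [pvCond, Bool.or_eq_true] at h
      rcases h with h | h | h | h
      · exact ⟨("concert", 4), by simp [pvKEYWORDS], rfl, h⟩
      · exact ⟨("music", 4), by simp [pvKEYWORDS], rfl, h⟩
      · exact ⟨("performance", 4), by simp [pvKEYWORDS], rfl, h⟩
      · exact ⟨("show", 4), by simp [pvKEYWORDS], rfl, h⟩
  | 5 =>
      simp only [pvCond, Bool.or_eq_true] at h
      rcases h with h | h | h | h
      · exact ⟨("holiday", 5), by simp [pvKEYWORDS], rfl, h⟩
      · exact ⟨("christmas", 5), by simp [pvKEYWORDS], rfl, h⟩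
      · exact ⟨("thanksgiving", 5), by simp [pvKEYWORDS], rfl, h⟩
      · exact ⟨("july 4", 5), by simp [pvKEYWORDS], rfl, h⟩
  | (n + 6) => simp [pvCond] at h

lemma best_eq_rank (L : List Char) : pvBest L = pvRank L := by
  apply Nat.le_antisymm
  · -- pvBest ≤ pvRank
    by_cases h6 : pvRank L = 6
    · rw [h6]; exact best_le_six L
    · obtain ⟨p, hp, hr, hin⟩ := kw_of_cond L (pvRank L) (cond_true_of_rank L _ rfl h6)
      calc pvBest L ≤ p.2 := best_le_of_infix L p hp hin
        _ = pvRank L := hr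
  · -- pvRank ≤ pvBest
    rcases best_cases L with h6 | ⟨p, hp, hin, he⟩
    · rw [h6]; exact rank_le_six L
    · rw [he]; exact le_trans (rank_le_of_cond L p.2 (cond_of_kw L p hp hin)) (le_refl _)

-- ===== VERDICT =====
theorem categorize_event_spec : Claim_equal_categorize_event := by
  intro event_name _
  unfold Spec_categorize_event
  rw [alt_eq_best, a_eq_rank, best_eq_rank]
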